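-- pv_equiv track=rewrite | github.com/fp-computer-programming/hw-8-3-p22npiselli | hw8-3-2.py | sum_no_odds
-- ===== SOURCE A (Python) =====
-- def sum_no_odds(num):
--     total = 0
--     x = 0
--     while x < len(num):
--         if num[x] % 2 == 0:
--             total += num[x]
--             x += 1
--         elif num[x] % 2 != 0:
--             return total
--     return total
-- ===== SOURCE B (Python) =====
-- def sum_no_odds(num):
--     idx = next((i for i, v in enumerate(num) if v % 2 != 0), len(num))
--     return sum(num[:idx])
-- ===== Notes on version B (the rewrite author's own statement) =====
-- stated objective: idiomatic
-- what changed: B first locates the index of the first odd element (default len(num)) and then sums the slice before it, replacing A's interleaved index-based test-and-accumulate while loop with a find-boundary-then-sum two-pass decomposition.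
import Mathlib
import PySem

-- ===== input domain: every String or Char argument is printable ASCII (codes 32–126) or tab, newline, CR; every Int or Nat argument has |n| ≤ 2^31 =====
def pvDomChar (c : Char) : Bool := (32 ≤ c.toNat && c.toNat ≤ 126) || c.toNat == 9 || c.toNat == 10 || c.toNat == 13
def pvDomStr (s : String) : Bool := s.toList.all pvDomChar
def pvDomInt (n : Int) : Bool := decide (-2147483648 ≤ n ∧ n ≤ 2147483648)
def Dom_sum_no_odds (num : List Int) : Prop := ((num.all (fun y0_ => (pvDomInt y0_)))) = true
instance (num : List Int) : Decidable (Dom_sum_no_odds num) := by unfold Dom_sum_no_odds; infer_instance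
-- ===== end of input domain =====

-- B separates locating the first odd element from the summation (find index, then sum the slice);
-- same values, different decomposition (idiomatic).

-- ===== PORT A =====
-- A's while loop over index x with accumulator total; the elif branch returns total at the first odd.
def sum_no_odds_go (num : List Int) (total : Int) (x : Nat) : Int :=
  if _h : x < num.length then
    if PySem.Int.mod num[x] 2 == 0 then
      sum_no_odds_go num (total + num[x]) (x + 1)
    else
      total
  else
    total
termination_by num.length - x

def sum_no_odds (num : List Int) : Int := sum_no_odds_go num 0 0

-- ===== PORT B =====
-- idx = first index with an odd value, defaulting to len(num); return sum(num[:idx])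
def sum_no_odds_alt (num : List Int) : Int :=
  let idx := num.findIdx (fun v => PySem.Int.mod v 2 != 0)
  (num.take idx).sum

-- ===== PRECONDITION & SPEC =====
def Spec_sum_no_odds (num : List Int) (out : Int) : Prop := out = sum_no_odds_alt num
instance (num : List Int) (out : Int) : Decidable (Spec_sum_no_odds num out) := by unfold Spec_sum_no_odds; infer_instance

-- ===== CLAIM (what is proved, stated in full; the proofs are below) =====
def Claim_equal_sum_no_odds : Prop := ∀ (num : List Int), Dom_sum_no_odds num → Spec_sum_no_odds num (sum_no_odds num)

-- ===== LEMMAS AND PROOFS =====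

-- common reference value: sum of the even prefix
def evenPrefixSum (l : List Int) : Int := (l.takeWhile (fun v => PySem.Int.mod v 2 == 0)).sum

theorem go_eq (num : List Int) (total : Int) (x : Nat) :
    sum_no_odds_go num total x = total + evenPrefixSum (num.drop x) := by
  by_cases h : x < num.length
  · rw [sum_no_odds_go, dif_pos h]
    have hd : num.drop x = num[x] :: num.drop (x + 1) := List.drop_eq_getElem_cons h
    by_cases he : (PySem.Int.mod num[x] 2 == 0) = true
    · rw [if_pos he, go_eq num (total + num[x]) (x + 1)]
      unfold evenPrefixSum
      rw [hd, List.takeWhile_cons, if_pos he, List.sum_cons]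
      ring
    · rw [if_neg he]
      unfold evenPrefixSum
      rw [hd, List.takeWhile_cons, if_neg he]
      simp
  · rw [sum_no_odds_go, dif_neg h]
    rw [List.drop_eq_nil_of_le (Nat.le_of_not_lt h)]
    simp [evenPrefixSum]
termination_by num.length - x

theorem take_findIdx_not (p : Int → Bool) (l : List Int) :
    (l.take (l.findIdx (fun v => !p v))).sum = (l.takeWhile p).sum := by
  induction l with
  | nil => rfl
  | cons a l ih =>
    rw [List.findIdx_cons, List.takeWhile_cons]
    cases hp : p a
    · simp
    · simp only [Bool.not_true, cond_false, List.take_succ_cons, List.sum_cons]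
      rw [ih]; simp

theorem alt_eq (num : List Int) : sum_no_odds_alt num = evenPrefixSum num :=
  take_findIdx_not (fun v => PySem.Int.mod v 2 == 0) num

-- ===== VERDICT (by name: the statement is the Claim_ definition above) =====
theorem sum_no_odds_spec : Claim_equal_sum_no_odds := by
  intro num _
  unfold Spec_sum_no_odds sum_no_odds
  rw [go_eq, alt_eq]
  simp
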